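-- pv_equiv track=rewrite | github.com/Rdyx/eabuilders | project/builds/utils.py | check_form_values
-- ===== SOURCE A (Python) =====
-- def check_form_values(form, field_name_to_check, fields_number_target):
--     """
--     Form field values checker.
--     Count if we get required number of fields and no double value before saving
--     """
--     fields_number = 0
--     field_values = []
--     wrong_field_values = False
--
--     for k, v in form.items():
--         if field_name_to_check in k:
--             fields_number += 1
--             if not v in field_values and v != "No selection":
--                 field_values.append(v)
--             else:
--                 wrong_field_values = True
--                 break
--
--     return fields_number == fields_number_target and not wrong_field_values
-- ===== SOURCE B (Python) =====
-- def check_form_values(form, field_name_to_check, fields_number_target):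
--     values = sorted(v for k, v in form.items() if field_name_to_check in k)
--     if len(values) != fields_number_target:
--         return False
--     prev = None
--     for v in values:
--         if v == "No selection" or v == prev:
--             return False
--         prev = v
--     return True
-- ===== Notes on version B (the rewrite author's own statement) =====
-- stated objective: alternative
-- what changed: A's single scan maintaining a seen-values list with linear membership tests is replaced by sort-then-adjacent-scan: collect and sort the matching values, check the count, then detect 'No selection' and any duplicate by comparing each value only to its sorted predecessor.
import Mathlib
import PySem

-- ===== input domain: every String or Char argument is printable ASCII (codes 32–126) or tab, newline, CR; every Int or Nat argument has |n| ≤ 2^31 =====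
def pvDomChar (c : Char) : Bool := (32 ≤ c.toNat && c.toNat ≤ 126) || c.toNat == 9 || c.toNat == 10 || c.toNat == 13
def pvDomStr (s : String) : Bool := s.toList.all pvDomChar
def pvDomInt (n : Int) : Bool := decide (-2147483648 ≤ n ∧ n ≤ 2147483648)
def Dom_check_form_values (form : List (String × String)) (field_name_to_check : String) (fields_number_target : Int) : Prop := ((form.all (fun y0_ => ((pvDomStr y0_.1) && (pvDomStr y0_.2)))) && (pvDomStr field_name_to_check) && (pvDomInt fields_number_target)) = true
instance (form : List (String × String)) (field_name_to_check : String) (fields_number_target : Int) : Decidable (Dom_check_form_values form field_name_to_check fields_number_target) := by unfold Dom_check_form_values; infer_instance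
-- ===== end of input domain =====

-- B replaces A's seen-list scan by sort-then-adjacent-scan: sort the matching values, check the count, then detect "No selection" and duplicates by comparing each value to its sorted predecessor; equal return values, no speed claim.

-- ===== PORT A =====
-- A's loop over form.items(), carrying (fields_number, field_values, wrong) with the break
def pvLoopA : List (String × String) → String → Int → List String → Int × Bool
  | [], _, n, _ => (n, false)
  | (k, v) :: rest, f, n, vals =>
    if PySem.Str.isIn f k then
      if !(vals.contains v) && !(v == "No selection") then
        pvLoopA rest f (n + 1) (vals ++ [v])
      else (n + 1, true)
    else pvLoopA rest f n vals

def check_form_values (form : List (String × String)) (field_name_to_check : String) (fields_number_target : Int) : Bool :=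
  let r := pvLoopA (PySem.Dict.ofList form).items field_name_to_check 0 []
  decide (r.1 = fields_number_target) && !r.2

-- ===== PORT B =====
-- B's for-loop over the sorted values, carrying prev (None → Option.none), early return False
def pvAdjOk : Option String → List String → Bool
  | _, [] => true
  | prev, v :: r => if v == "No selection" || some v == prev then false else pvAdjOk (some v) r

def check_form_values_alt (form : List (String × String)) (field_name_to_check : String) (fields_number_target : Int) : Bool :=
  let values := PySem.List.sorted (((PySem.Dict.ofList form).items.filter (fun p => PySem.Str.isIn field_name_to_check p.1)).map (fun p => p.2)) (fun x => x) false
  if !decide ((values.length : Int) = fields_number_target) then false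
  else pvAdjOk none values

-- ===== PRECONDITION & SPEC =====
def Spec_check_form_values (form : List (String × String)) (field_name_to_check : String) (fields_number_target : Int) (out : Bool) : Prop := out = check_form_values_alt form field_name_to_check fields_number_target
instance (form : List (String × String)) (field_name_to_check : String) (fields_number_target : Int) (out : Bool) : Decidable (Spec_check_form_values form field_name_to_check fields_number_target out) := by unfold Spec_check_form_values; infer_instance

-- ===== CLAIM (what is proved, stated in full; the proofs are below) =====
def Claim_equal_check_form_values : Prop := ∀ (form : List (String × String)) (field_name_to_check : String) (fields_number_target : Int), Dom_check_form_values form field_name_to_check fields_number_target → Spec_check_form_values form field_name_to_check fields_number_target (check_form_values form field_name_to_check fields_number_target)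

-- ===== LEMMAS AND PROOFS =====

-- A's accumulator check, sequentially over the matching values starting from seed `vals`
def pvScanOk : List String → List String → Bool
  | _, [] => true
  | vals, v :: r => (!(vals.contains v) && !(v == "No selection")) && pvScanOk (vals ++ [v]) r

lemma pvLoopA_eq (f : String) (t : Int) : ∀ (l : List (String × String)) (n : Int) (vals : List String),
    (decide ((pvLoopA l f n vals).1 = t) && !(pvLoopA l f n vals).2)
      = (decide ((n + ((l.filter (fun p => PySem.Str.isIn f p.1)).map (fun p => p.2)).length : Int) = t)
          && pvScanOk vals ((l.filter (fun p => PySem.Str.isIn f p.1)).map (fun p => p.2))) := by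
  intro l
  induction l with
  | nil => intro n vals; simp [pvLoopA, pvScanOk]
  | cons p rest ih =>
    intro n vals
    obtain ⟨k, v⟩ := p
    rcases hm : PySem.Str.isIn f k with _ | _
    · simp only [pvLoopA, List.filter_cons, hm, Bool.false_eq_true, if_false, ih n vals]
    · simp only [pvLoopA, List.filter_cons, hm, if_true, List.map_cons, pvScanOk]
      rcases hg : (!(vals.contains v) && !(v == "No selection")) with _ | _
      · simp only [Bool.false_eq_true, if_false, Bool.not_true, Bool.and_false,
          Bool.false_and]
      · simp only [if_true, Bool.true_and, List.length_cons]
        rw [ih (n + 1) (vals ++ [v])]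
        have h3 : n + 1 + (((rest.filter (fun p => PySem.Str.isIn f p.1)).map (fun p => p.2)).length : Int)
            = n + ((((rest.filter (fun p => PySem.Str.isIn f p.1)).map (fun p => p.2)).length : Int) + 1) := by
          ring
        rw [h3]
        push_cast
        ring_nf

lemma pvScanOk_iff : ∀ (vs vals : List String),
    pvScanOk vals vs = true ↔ (vs.Nodup ∧ ∀ x ∈ vs, x ∉ vals ∧ x ≠ "No selection") := by
  intro vs
  induction vs with
  | nil => intro vals; simp [pvScanOk]
  | cons v r ih =>
    intro vals
    simp only [pvScanOk, Bool.and_eq_true, Bool.not_eq_true', List.contains_eq_mem,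
      decide_eq_false_iff_not, beq_eq_false_iff_ne, List.nodup_cons, List.mem_cons, ih]
    constructor
    · rintro ⟨⟨hv, hns⟩, hr, hall⟩
      refine ⟨⟨fun hvr => ?_, hr⟩, ?_⟩
      · exact ((hall v hvr).1) (by simp)
      · rintro x (rfl | hx)
        · exact ⟨hv, hns⟩
        · have := hall x hx
          simp only [List.mem_append, List.mem_singleton] at this
          exact ⟨fun h => this.1 (Or.inl h), this.2⟩
    · rintro ⟨⟨hvr, hr⟩, hall⟩
      refine ⟨⟨(hall v (Or.inl rfl)).1, (hall v (Or.inl rfl)).2⟩, hr, ?_⟩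
      intro x hx
      have hxs := hall x (Or.inr hx)
      refine ⟨?_, hxs.2⟩
      simp only [List.mem_append, List.mem_singleton]
      rintro (h | rfl)
      · exact hxs.1 h
      · exact hvr hx

-- B's adjacent scan on a ≤-sorted list detects exactly duplicates / "No selection" / the prev value
lemma pvAdjOk_iff : ∀ (vs : List String) (prev : Option String),
    vs.Pairwise (· ≤ ·) → (∀ p, prev = some p → ∀ x ∈ vs, p ≤ x) →
    (pvAdjOk prev vs = true ↔ vs.Nodup ∧ "No selection" ∉ vs ∧ ∀ p, prev = some p → p ∉ vs) := by
  intro vs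
  induction vs with
  | nil => intro prev _ _; simp [pvAdjOk]
  | cons v r ih =>
    intro prev hpw hprev
    have hpw' := (List.pairwise_cons.mp hpw)
    simp only [pvAdjOk]
    by_cases hc : (v == "No selection" || some v == prev) = true
    · simp only [hc, if_true]
      constructor
      · intro h; exact absurd h (by simp)
      · rintro ⟨hnd, hns, hp⟩
        rcases Bool.or_eq_true_iff.mp hc with h1 | h1
        · have hv : v = "No selection" := eq_of_beq h1
          rw [hv] at hns
          exact absurd List.mem_cons_self hns
        · have hpv : prev = some v := (eq_of_beq h1).symm
          exact absurd List.mem_cons_self (hp v hpv)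
    · simp only [hc, Bool.false_eq_true, if_false]
      have hvne : v ≠ "No selection" := by
        intro h; apply hc; simp [h]
      have hvprev : ∀ p, prev = some p → p ≠ v := by
        intro p hp h; apply hc; rw [hp, h]; simp
      rw [ih (some v) hpw'.2 (by rintro p ⟨rfl⟩; exact hpw'.1)]
      constructor
      · rintro ⟨hnd, hns, hv⟩
        refine ⟨List.nodup_cons.mpr ⟨hv v rfl, hnd⟩, ?_, ?_⟩
        · simp only [List.mem_cons]; rintro (h | h)
          · exact hvne h.symm
          · exact hns h
        · rintro p hp hmem
          rcases List.mem_cons.mp hmem with rfl | hmem'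
          · exact hvprev p hp rfl
          · -- p ≤ v (prev ≤ head) and v ≤ p (head ≤ tail) force p = v
            have h1 : p ≤ v := hprev p hp v List.mem_cons_self
            have h2 : v ≤ p := hpw'.1 p hmem'
            exact hvprev p hp (le_antisymm h1 h2)
      · rintro ⟨hnd, hns, hp⟩
        have hnd' := List.nodup_cons.mp hnd
        refine ⟨hnd'.2, fun h => hns (List.mem_cons_of_mem _ h), ?_⟩
        rintro p ⟨rfl⟩; exact hnd'.1

-- ===== VERDICT (by name: the statement is the Claim_ definition above) =====
theorem check_form_values_spec : Claim_equal_check_form_values := by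
  intro form f t _
  unfold Spec_check_form_values check_form_values check_form_values_alt
  rw [pvLoopA_eq f t ((PySem.Dict.ofList form).items) 0 []]
  set vals := (((PySem.Dict.ofList form).items.filter (fun p => PySem.Str.isIn f p.1)).map (fun p => p.2)) with hvals
  set svals := PySem.List.sorted vals (fun x => x) false with hsvals
  have hperm : svals.Perm vals := PySem.List.sorted_perm vals (fun x => x) false
  have hlen : svals.length = vals.length := hperm.length_eq
  have hA : pvScanOk [] vals = true ↔ (vals.Nodup ∧ "No selection" ∉ vals) := by
    rw [pvScanOk_iff]
    constructor
    · rintro ⟨h1, h2⟩; exact ⟨h1, fun h => (h2 _ h).2 rfl⟩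
    · rintro ⟨h1, h2⟩; exact ⟨h1, fun x hx => ⟨by simp, fun he => h2 (he ▸ hx)⟩⟩
  have hpw : svals.Pairwise (· ≤ ·) := PySem.List.sorted_pairwise vals (fun x => x)
  have hB : pvAdjOk none svals = true ↔ (svals.Nodup ∧ "No selection" ∉ svals) := by
    rw [pvAdjOk_iff svals none hpw (by rintro p ⟨⟩)]
    constructor
    · rintro ⟨h1, h2, _⟩; exact ⟨h1, h2⟩
    · rintro ⟨h1, h2⟩; exact ⟨h1, h2, by rintro p ⟨⟩⟩
  have hAB : pvScanOk [] vals = pvAdjOk none svals := by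
    rcases h : pvAdjOk none svals with _ | _
    · rcases h2 : pvScanOk [] vals with _ | _
      · rfl
      · exfalso
        obtain ⟨hnd, hns⟩ := hA.mp h2
        have : pvAdjOk none svals = true :=
          hB.mpr ⟨hperm.nodup_iff.mpr hnd, fun hm => hns (hperm.mem_iff.mp hm)⟩
        rw [h] at this; exact Bool.false_ne_true this
    · obtain ⟨hnd, hns⟩ := hB.mp h
      exact hA.mpr ⟨hperm.nodup_iff.mp hnd, fun hm => hns (hperm.mem_iff.mpr hm)⟩
  rw [hAB]
  have hl2 : decide (((svals.length : Int)) = t) = decide (((vals.length : Int)) = t) := by rw [hlen]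
  show (decide (0 + (vals.length : Int) = t) && pvAdjOk none svals)
      = if (!decide ((svals.length : Int) = t)) = true then false else pvAdjOk none svals
  rw [hl2]
  rcases hd : decide ((vals.length : Int) = t) with _ | _ <;> simp [hd]
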